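-- pv_equiv track=rewrite | github.com/mafuba8/adventofcode | 2023/day07/day7-2.py | compare_draws
-- ===== SOURCE A (Python) =====
-- def compare_draws(draw1, draw2):
--     """Comparison function for two draws with the same evaluation.
--     Returns
--         -1 if draw1 < draw2
--         0  if draw1 = draw2
--         +1 if draw1 > draw2
--     """
--     # Note that the original cards (draw[0]) are compared,
--     # and NOT the replaced cards (draw[1])!
--     cards1 = draw1[0]
--     cards2 = draw2[0]
--     if len(cards1) == 0:
--         return 0  # Empty hands have the same rank
--
--     # Compare the first card.
--     if cards1[0] > cards2[0]:
--         return 1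
--     elif cards1[0] < cards2[0]:
--         return -1
--
--     # If the first card is the same, recursively compare the remaining cards.
--     return compare_draws((cards1[1:], draw1[1], draw1[2], draw1[3]), (cards2[1:], draw2[1], draw2[2], draw2[3]))
-- ===== SOURCE B (Python) =====
-- def compare_draws(draw1, draw2):
--     """Comparison function for two draws with the same evaluation.
--     Returns -1/0/+1 as draw1's cards compare to draw2's."""
--     cards1 = draw1[0]
--     cards2 = draw2[0]
--     for i in range(len(cards1)):
--         if cards1[i] > cards2[i]:
--             return 1
--         if cards1[i] < cards2[i]:
--             return -1
--     return 0
-- ===== Notes on version B (the rewrite author's own statement) =====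
-- stated objective: simpler
-- what changed: Replaces A's recursion that rebuilds two 4-tuples with sliced strings at every step by a single flat index loop over the first string, comparing characters directly; no tuple/slice allocation, no recursion depth, no special empty-hand case.
import Mathlib
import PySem

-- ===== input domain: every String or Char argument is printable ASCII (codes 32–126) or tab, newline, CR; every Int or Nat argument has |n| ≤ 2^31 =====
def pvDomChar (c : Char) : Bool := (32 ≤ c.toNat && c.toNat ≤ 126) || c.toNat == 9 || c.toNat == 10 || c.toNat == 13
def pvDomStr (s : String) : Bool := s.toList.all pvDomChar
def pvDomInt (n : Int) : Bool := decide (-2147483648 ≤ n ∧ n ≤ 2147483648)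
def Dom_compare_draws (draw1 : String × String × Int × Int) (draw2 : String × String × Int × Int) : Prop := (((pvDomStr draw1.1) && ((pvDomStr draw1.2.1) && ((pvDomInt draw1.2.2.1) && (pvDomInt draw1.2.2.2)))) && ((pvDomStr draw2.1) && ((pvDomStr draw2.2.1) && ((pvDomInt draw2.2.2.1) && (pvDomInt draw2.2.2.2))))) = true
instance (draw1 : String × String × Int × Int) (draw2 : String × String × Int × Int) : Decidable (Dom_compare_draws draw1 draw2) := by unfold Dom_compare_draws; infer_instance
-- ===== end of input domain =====

-- B replaces A's recursion (which rebuilds sliced 4-tuples each step) by one flat index loop over the first string: simpler.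


-- ===== PORT A =====
-- A's recursion only inspects the card strings (the other three tuple fields are carried
-- along unchanged), so the port recurses on the two character lists; cards2[0] when cards2
-- is empty is an IndexError in Python (excluded by Pre_), the port returns 0 there.
def pvGoA : List Char → List Char → Int
  | [], _ => 0
  | c1 :: r1, l2 =>
    match l2 with
    | [] => 0  -- cards2[0] raises IndexError in Python; outside Pre_
    | c2 :: r2 =>
      if c1 > c2 then 1
      else if c1 < c2 then -1
      else pvGoA r1 r2

def compare_draws (draw1 : String × String × Int × Int) (draw2 : String × String × Int × Int) : Int :=
  pvGoA draw1.1.toList draw2.1.toList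

-- ===== PORT B =====
-- B's loop 'for i in range(len(cards1))', indexing cards2[i] via pyGet? (none = IndexError,
-- excluded by Pre_; the port returns 0 there).
def pvGoB (cs1 cs2 : List Char) (i : Nat) : Int :=
  if h : i < cs1.length then
    match PySem.List.pyGet? cs2 (i : Int) with
    | none => 0  -- cards2[i] raises IndexError in Python; outside Pre_
    | some c2 =>
      if cs1[i] > c2 then 1
      else if cs1[i] < c2 then -1
      else pvGoB cs1 cs2 (i + 1)
  else 0
termination_by cs1.length - i

def compare_draws_alt (draw1 : String × String × Int × Int) (draw2 : String × String × Int × Int) : Int :=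
  pvGoB draw1.1.toList draw2.1.toList 0

-- ===== PRECONDITION & SPEC =====
-- Pre_ excludes exactly the inputs where Python A raises IndexError: when draw2's cards are
-- a strict prefix of draw1's cards (in particular shorter with all common positions equal).
def Pre_compare_draws (draw1 : String × String × Int × Int) (draw2 : String × String × Int × Int) : Prop :=
  ¬ (draw2.1.toList.isPrefixOf draw1.1.toList = true ∧ draw2.1.toList.length < draw1.1.toList.length)
instance (draw1 : String × String × Int × Int) (draw2 : String × String × Int × Int) : Decidable (Pre_compare_draws draw1 draw2) := by unfold Pre_compare_draws; infer_instance

def pvWitness_compare_draws : (String × String × Int × Int) × (String × String × Int × Int) :=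
  (("32T3K", "32T3K", 0, 765), ("T55J5", "T55J5", 1, 684))

def Spec_compare_draws (draw1 : String × String × Int × Int) (draw2 : String × String × Int × Int) (out : Int) : Prop := out = compare_draws_alt draw1 draw2
instance (draw1 : String × String × Int × Int) (draw2 : String × String × Int × Int) (out : Int) : Decidable (Spec_compare_draws draw1 draw2 out) := by unfold Spec_compare_draws; infer_instance

-- ===== CLAIM (what is proved, stated in full; the proofs are below) =====
def Claim_equal_compare_draws : Prop := ∀ (draw1 : String × String × Int × Int) (draw2 : String × String × Int × Int), Dom_compare_draws draw1 draw2 → Pre_compare_draws draw1 draw2 → Spec_compare_draws draw1 draw2 (compare_draws draw1 draw2)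

-- ===== LEMMAS AND PROOFS =====
-- At each step i, the rest of B's loop computes A's recursion on the dropped suffixes.
theorem pvGoB_eq_pvGoA (cs1 cs2 : List Char) (i : Nat) :
    pvGoB cs1 cs2 i = pvGoA (cs1.drop i) (cs2.drop i) := by
  suffices H : ∀ n j, cs1.length ≤ j + n → pvGoB cs1 cs2 j = pvGoA (cs1.drop j) (cs2.drop j) from
    H cs1.length i (by omega)
  intro n
  induction n with
  | zero =>
    intro j hj
    rw [pvGoB, dif_neg (by omega), List.drop_eq_nil_of_le (by omega), pvGoA]
  | succ n ih =>
    intro j hj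
    rw [pvGoB]
    by_cases hlt : j < cs1.length
    · rw [dif_pos hlt]
      by_cases h2 : j < cs2.length
      · have hget : PySem.List.pyGet? cs2 (j : Int) = some cs2[j] := by
          rw [PySem.List.pyGet?_natCast]; exact List.getElem?_eq_getElem h2
        rw [hget, List.drop_eq_getElem_cons hlt, List.drop_eq_getElem_cons h2, pvGoA]
        by_cases hgt : cs1[j] > cs2[j]
        · simp [hgt]
        · by_cases hlt2 : cs1[j] < cs2[j]
          · simp [hgt, hlt2]
          · simp [hgt, hlt2, ih (j + 1) (by omega)]
      · have hget : PySem.List.pyGet? cs2 (j : Int) = none := by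
          rw [PySem.List.pyGet?_natCast]; exact List.getElem?_eq_none (by omega)
        rw [hget, List.drop_eq_getElem_cons hlt, List.drop_eq_nil_of_le (show cs2.length ≤ j by omega)]
        rw [pvGoA]
    · rw [dif_neg hlt, List.drop_eq_nil_of_le (by omega), pvGoA]

-- ===== VERDICT (by name: the statement is the Claim_ definition above) =====
theorem compare_draws_spec : Claim_equal_compare_draws := by
  intro d1 d2 _ _
  unfold Spec_compare_draws compare_draws compare_draws_alt
  rw [pvGoB_eq_pvGoA]
  simp
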